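-- pv_equiv track=rewrite | github.com/g1tsys/coding | Day 3/192-vehicles_max_colors.py | max_color_in_window
-- ===== SOURCE A (Python) =====
-- from collections import Counter
--
-- def max_color_in_window(car_colors, w):
--     # 创建一个空的Counter对象来记录每种颜色的出现次数
--     color_counter = Counter()
--     max_color_count = 0
--
--     # 遍历车辆颜色列表
--     for i, color in enumerate(car_colors):
--         # 添加当前颜色到Counter
--         color_counter[color] += 1
--
--         # 如果窗口中的车辆数超过了w，我们需要从窗口最左侧移除一辆车
--         if i >= w:
--             color_to_remove = car_colors[i - w]
--             color_counter[color_to_remove] -= 1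
--             # 如果某颜色的车辆数减到了0，我们从Counter中移除这种颜色
--             if color_counter[color_to_remove] == 0:
--                 del color_counter[color_to_remove]
--
--         # 更新最大颜色数量
--         max_color_count = max(max_color_count, color_counter[color])
--
--     return max_color_count
-- ===== SOURCE B (Python) =====
-- def max_color_in_window(car_colors, w):
--     best = 0
--     for i, color in enumerate(car_colors):
--         lo = max(0, i - w + 1)
--         best = max(best, car_colors[lo:i + 1].count(color))
--     return best
-- ===== Notes on version B (the rewrite author's own statement) =====
-- stated objective: alternative
-- what changed: Replaces the stateful incremental sliding-window Counter (add current color, conditionally evict the color leaving the window, delete entries that hit zero) by a stateless pass that at each index slices the current window out of the list afresh and counts only the current color there, keeping a running maximum.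
import Mathlib
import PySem

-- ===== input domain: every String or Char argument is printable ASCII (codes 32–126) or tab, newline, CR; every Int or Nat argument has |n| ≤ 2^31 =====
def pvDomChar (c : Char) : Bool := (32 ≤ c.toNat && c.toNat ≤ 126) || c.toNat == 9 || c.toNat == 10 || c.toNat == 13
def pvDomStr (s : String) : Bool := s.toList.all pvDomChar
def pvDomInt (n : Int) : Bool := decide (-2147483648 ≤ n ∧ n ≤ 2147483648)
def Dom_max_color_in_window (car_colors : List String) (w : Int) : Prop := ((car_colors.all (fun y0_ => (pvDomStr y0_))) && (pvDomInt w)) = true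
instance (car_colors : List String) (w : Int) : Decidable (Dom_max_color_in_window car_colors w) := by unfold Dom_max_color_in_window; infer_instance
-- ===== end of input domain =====

-- B replaces A's incremental sliding Counter by a stateless per-index window recount (alternative decomposition, same results; not faster).


-- ===== PORT A =====
-- one loop iteration of A: bump the current color's count, evict the color
-- leaving the window when i >= w (deleting it at count 0), update the max
def mcwStepA (car_colors : List String) (w : Int)
    (st : PySem.Dict String Int × Int) (p : Int × String) : PySem.Dict String Int × Int :=
  let d1 := st.1.modify p.2 0 (· + 1)
  let d2 :=
    if w ≤ p.1 then
      let ctr := (PySem.List.pyGet? car_colors (p.1 - w)).getD ""   -- IndexError = none; Pre_ excludes it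
      let d3 := d1.modify ctr 0 (· - 1)
      if d3.getD ctr 0 = 0 then d3.erase ctr else d3
    else d1
  (d2, max st.2 (d2.getD p.2 0))

def max_color_in_window (car_colors : List String) (w : Int) : Int :=
  ((PySem.List.enumerate car_colors 0).foldl (mcwStepA car_colors w) (PySem.Dict.empty, 0)).2

-- ===== PORT B =====
-- one loop iteration of B: slice the window ending at i afresh, count the current color
def mcwStepB (car_colors : List String) (w : Int) (best : Int) (p : Int × String) : Int :=
  max best ((PySem.List.slice car_colors (some (max 0 (p.1 - w + 1))) (some (p.1 + 1))).count p.2 : Int)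

def max_color_in_window_alt (car_colors : List String) (w : Int) : Int :=
  (PySem.List.enumerate car_colors 0).foldl (mcwStepB car_colors w) 0

-- ===== PRECONDITION & SPEC =====
-- Pre_ excludes exactly the inputs where A raises IndexError: negative w with a nonempty list.
def Pre_max_color_in_window (car_colors : List String) (w : Int) : Prop :=
  0 ≤ w ∨ car_colors = []
instance (car_colors : List String) (w : Int) : Decidable (Pre_max_color_in_window car_colors w) := by
  unfold Pre_max_color_in_window; infer_instance

def pvWitness_max_color_in_window : List String × Int := (["red", "blue", "red"], 2)

def Spec_max_color_in_window (car_colors : List String) (w : Int) (out : Int) : Prop := out = max_color_in_window_alt car_colors w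
instance (car_colors : List String) (w : Int) (out : Int) : Decidable (Spec_max_color_in_window car_colors w out) := by unfold Spec_max_color_in_window; infer_instance

-- ===== CLAIM (what is proved, stated in full; the proofs are below) =====
def Claim_equal_max_color_in_window : Prop := ∀ (car_colors : List String) (w : Int), Dom_max_color_in_window car_colors w → Pre_max_color_in_window car_colors w → Spec_max_color_in_window car_colors w (max_color_in_window car_colors w)

-- ===== LEMMAS AND PROOFS =====

-- lookup in A's counter after `del` of a key: that key reads as absent, others unchanged
lemma mcw_get?_erase (d : PySem.Dict String Int) (k c : String) :
    (d.erase k).get? c = if c = k then none else d.get? c := by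
  rcases d with ⟨l⟩
  simp only [PySem.Dict.erase, PySem.Dict.get?]
  induction l with
  | nil => simp
  | cons p t ih =>
    by_cases hpk : p.1 = k <;> by_cases hpc : p.1 = c <;> simp_all

lemma mcw_getD_erase (d : PySem.Dict String Int) (k c : String) :
    (d.erase k).getD c 0 = if c = k then 0 else d.getD c 0 := by
  simp only [PySem.Dict.getD, mcw_get?_erase]
  split_ifs <;> simp

-- the loop invariant: after processing the prefix `pre`, A's counter holds, for every
-- color, its count in the current window (the last ≤ W elements of `pre`), and from the
-- same running maximum both loops compute the same final maximum.
lemma mcw_loop_eq (xs : List String) (W : Nat) :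
    ∀ (suf pre : List String) (d : PySem.Dict String Int) (m : Int),
      xs = pre ++ suf →
      (∀ c, d.getD c 0 = ((pre.drop (pre.length - W)).count c : Int)) →
      ((PySem.List.enumerate suf (pre.length : Int)).foldl (mcwStepA xs (W : Int)) (d, m)).2
        = (PySem.List.enumerate suf (pre.length : Int)).foldl (mcwStepB xs (W : Int)) m := by
  intro suf
  induction suf with
  | nil => intro pre d m _ _; simp [PySem.List.enumerate]
  | cons x rest ih =>
    intro pre d m hxs hinv
    rw [PySem.List.enumerate_cons]
    simp only [List.foldl_cons]
    set n := pre.length with hn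
    -- the new window (ending at index n inclusive)
    set win' : List String := (pre ++ [x]).drop (n + 1 - W) with hwin'
    have hxlen : xs.length = n + 1 + rest.length := by
      rw [hxs]; simp [hn]; omega
    have htake : xs.take (n + 1) = pre ++ [x] := by
      rw [hxs]
      rw [List.take_append]
      simp [hn]
    -- B's freshly sliced window is exactly win'
    have hshape : max 0 ((n : Int) - (W : Int) + 1) = ((n + 1 - W : Nat) : Int) := by omega
    have hBslice : PySem.List.slice xs (some (max 0 ((n : Int) - (W : Int) + 1))) (some ((n : Int) + 1))
        = win' := by
      rw [hshape]
      have : ((n : Int) + 1) = ((n + 1 : Nat) : Int) := by omega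
      rw [this, PySem.List.slice_natCast]
      rw [hwin', ← htake, List.drop_take]
    have hcast : (((pre ++ [x]).length : Nat) : Int) = (n : Int) + 1 := by
      simp [hn]
    have hxs' : xs = (pre ++ [x]) ++ rest := by simpa using hxs
    -- the updated counter satisfies the invariant for win', in both branches of `if i >= w`
    have hd2 : ∀ c, (mcwStepA xs (W : Int) (d, m) ((n : Int), x)).1.getD c 0 = ((win'.count c : Int)) := by
      intro c
      by_cases hWn : W ≤ n
      · -- sliding case: the color entering is x, the color leaving is xs[n-W]
        have hlt : n - W < xs.length := by omega
        have hlt2 : n - W < (pre ++ [x]).length := by simp [hn]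
        have hctr2 : xs[n - W]'hlt = (pre ++ [x])[n - W]'hlt2 := by
          have e1 := List.getElem_of_eq hxs' hlt
          rw [e1]
          exact List.getElem_append_left hlt2
        have hctrEq : (PySem.List.pyGet? xs ((n : Int) - (W : Int))).getD "" = (pre ++ [x])[n - W]'hlt2 := by
          have hidx : (n : Int) - (W : Int) = ((n - W : Nat) : Int) := by omega
          rw [hidx, PySem.List.pyGet?_natCast, List.getElem?_eq_getElem hlt]
          exact hctr2
        have hcons : (pre ++ [x]).drop (n - W) = ((pre ++ [x])[n - W]'hlt2) :: win' := by
          rw [List.drop_eq_getElem_cons hlt2, hwin']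
          have e : n - W + 1 = n + 1 - W := by omega
          rw [e]
        have hdropA : (pre ++ [x]).drop (n - W) = pre.drop (n - W) ++ [x] :=
          List.drop_append_of_le_length (by omega)
        simp only [mcwStepA, if_pos (show (W : Int) ≤ (n : Int) by exact_mod_cast hWn), hctrEq]
        have h3 : ∀ c', ((d.modify x 0 (· + 1)).modify ((pre ++ [x])[n - W]'hlt2) 0 (· - 1)).getD c' 0
            = (win'.count c' : Int) := by
          intro c'
          have hconsapp : List.drop (n - W) (pre ++ [x]) = [(pre ++ [x])[n - W]'hlt2] ++ win' := hcons
          have h := congrArg (List.count c') (hdropA.symm.trans hconsapp)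
          rw [List.count_append, List.count_append] at h
          rw [PySem.Dict.getD_modify, PySem.Dict.getD_modify, PySem.Dict.getD_modify]
          have hic := hinv c'
          have hix := hinv x
          have hiv := hinv ((pre ++ [x])[n - W]'hlt2)
          by_cases h1 : c' = x <;> by_cases h2 : c' = (pre ++ [x])[n - W]'hlt2
          · rw [if_pos h2, if_pos (h2.symm.trans h1)]
            have e1 : List.count c' [x] = 1 := by rw [h1]; simp
            have e2 : List.count c' [(pre ++ [x])[n - W]'hlt2] = 1 := by rw [← h2]; simp
            rw [e1, e2] at h
            rw [h1] at h ⊢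
            omega
          · rw [if_neg h2, if_pos h1]
            have e1 : List.count c' [x] = 1 := by rw [h1]; simp
            have e2 : List.count c' [(pre ++ [x])[n - W]'hlt2] = 0 :=
              List.count_eq_zero_of_not_mem (by simp [h2])
            rw [e1, e2] at h
            rw [h1] at h ⊢
            omega
          · rw [if_pos h2, if_neg (fun hh => h1 (h2.trans hh))]
            have e1 : List.count c' [x] = 0 :=
              List.count_eq_zero_of_not_mem (by simp [h1])
            have e2 : List.count c' [(pre ++ [x])[n - W]'hlt2] = 1 := by rw [← h2]; simp
            rw [e1, e2] at h
            rw [← h2] at hiv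
            rw [← h2]
            omega
          · rw [if_neg h2, if_neg h1]
            have e1 : List.count c' [x] = 0 :=
              List.count_eq_zero_of_not_mem (by simp [h1])
            have e2 : List.count c' [(pre ++ [x])[n - W]'hlt2] = 0 :=
              List.count_eq_zero_of_not_mem (by simp [h2])
            rw [e1, e2] at h
            omega
        split
        · -- del branch: the evicted color reached 0, so reading it back still gives 0
          next hz =>
            rw [mcw_getD_erase]
            by_cases h2 : c = (pre ++ [x])[n - W]'hlt2
            · rw [if_pos h2]
              have h5 := h3 ((pre ++ [x])[n - W]'hlt2)
              rw [hz] at h5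
              rw [h2]
              omega
            · rw [if_neg h2]
              exact h3 c
        · exact h3 c
      · -- growing case: i < w, nothing is evicted and the window is the whole prefix
        have h0 : n + 1 - W = 0 := by omega
        have h0' : n - W = 0 := by omega
        simp only [mcwStepA, if_neg (show ¬ (W : Int) ≤ (n : Int) by exact_mod_cast hWn)]
        rw [PySem.Dict.getD_modify]
        have hinv' := hinv c
        have hinvx := hinv x
        rw [h0', List.drop_zero] at hinv' hinvx
        rw [hwin', h0, List.drop_zero]
        by_cases h1 : c = x
        · rw [if_pos h1, h1]
          have e : List.count x (pre ++ [x]) = List.count x pre + 1 := by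
            rw [List.count_append]; simp
          omega
        · rw [if_neg h1]
          have ez : List.count c [x] = 0 := List.count_eq_zero_of_not_mem (by simp [h1])
          have e : List.count c (pre ++ [x]) = List.count c pre := by
            rw [List.count_append, ez]
            omega
          omega
    have hsnd : (mcwStepA xs (W : Int) (d, m) ((n : Int), x)).2
        = max m ((mcwStepA xs (W : Int) (d, m) ((n : Int), x)).1.getD x 0) := by
      simp only [mcwStepA]
    have hM2 : (mcwStepA xs (W : Int) (d, m) ((n : Int), x)).2 = max m ((win'.count x : Int)) := by
      rw [hsnd, hd2 x]
    have hB1 : mcwStepB xs (W : Int) m ((n : Int), x) = max m ((win'.count x : Int)) := by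
      simp only [mcwStepB, hBslice]
    have hih := ih (pre ++ [x]) (mcwStepA xs (W : Int) (d, m) ((n : Int), x)).1
      (mcwStepA xs (W : Int) (d, m) ((n : Int), x)).2 hxs' (by
        intro c
        rw [hd2 c, hwin']
        congr 2
        simp [hn])
    rw [hcast] at hih
    rw [hB1, ← hM2]
    rw [← hih]


theorem max_color_in_window_spec : Claim_equal_max_color_in_window := by
  intro xs w _ hpre
  unfold Spec_max_color_in_window
  rcases hpre with hw | hnil
  · have hwW : w = ((w.toNat : Nat) : Int) := (Int.toNat_of_nonneg hw).symm
    unfold max_color_in_window max_color_in_window_alt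
    rw [hwW]
    have h := mcw_loop_eq xs w.toNat xs [] PySem.Dict.empty 0 (by simp)
      (by intro c; simp [PySem.Dict.getD_empty])
    simpa using h
  · subst hnil
    rfl
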